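-- pv_equiv track=rewrite | github.com/crossstack-ai/crossbridge | adapters/selenium_specflow_dotnet/async_await_extractor.py | _convert_call_to_python
-- ===== SOURCE A (Python) =====
-- def _convert_call_to_python(csharp_call: str) -> str:
--     """Convert C# method call to Python equivalent."""
--     # Simplified conversion
--     python_call = csharp_call
--
--     # Convert common patterns
--     conversions = {
--         'HttpClient.GetAsync': 'client.get',
--         'HttpClient.PostAsync': 'client.post',
--         'Task.Delay': 'asyncio.sleep',
--         'WebDriver.FindElementAsync': 'page.query_selector',
--         'WebDriver.ClickAsync': 'element.click',
--     }
--
--     for csharp_pattern, python_pattern in conversions.items():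
--         if csharp_pattern in python_call:
--             python_call = python_call.replace(csharp_pattern, python_pattern)
--
--     return python_call
-- ===== SOURCE B (Python) =====
-- def _convert_call_to_python(csharp_call: str) -> str:
--     """Convert C# method call to Python equivalent."""
--     conversions = [
--         ('HttpClient.GetAsync', 'client.get'),
--         ('HttpClient.PostAsync', 'client.post'),
--         ('Task.Delay', 'asyncio.sleep'),
--         ('WebDriver.FindElementAsync', 'page.query_selector'),
--         ('WebDriver.ClickAsync', 'element.click'),
--     ]
--
--     def go(call, pairs):
--         if not pairs:
--             return call
--         pattern, replacement = pairs[0]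
--         # tokenize on the pattern, glue back with the replacement
--         return go(replacement.join(call.split(pattern)), pairs[1:])
--
--     return go(csharp_call, conversions)
-- ===== Notes on version B (the rewrite author's own statement) =====
-- stated objective: alternative
-- what changed: B replaces the membership-guarded sequential str.replace loop over the dict by a recursive fold over the conversion table that rewrites each pattern by tokenizing the string with split(pattern) and gluing the pieces back with replacement.join, proved equal to replace via a join-of-split characterisation.
import Mathlib
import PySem

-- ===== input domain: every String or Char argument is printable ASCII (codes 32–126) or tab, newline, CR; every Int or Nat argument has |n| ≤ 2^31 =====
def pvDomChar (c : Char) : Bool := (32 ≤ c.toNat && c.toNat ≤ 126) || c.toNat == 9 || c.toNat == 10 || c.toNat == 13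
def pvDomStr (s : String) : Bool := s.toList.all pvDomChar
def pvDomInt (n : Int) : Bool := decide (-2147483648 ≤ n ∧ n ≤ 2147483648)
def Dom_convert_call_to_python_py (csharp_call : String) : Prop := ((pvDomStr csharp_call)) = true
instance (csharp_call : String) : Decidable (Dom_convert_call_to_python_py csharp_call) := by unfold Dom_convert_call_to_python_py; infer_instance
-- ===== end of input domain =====

-- B rewrites each pattern by split-on-pattern + join-with-replacement folded recursively
-- over the conversion table, instead of A's membership-guarded str.replace loop (alternative
-- decomposition, same cost).


-- ===== PORT A =====
-- the 'conversions' dict literal; .items() iterates it in insertion order = this list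
def convTableA : List (String × String) :=
  [("HttpClient.GetAsync", "client.get"),
   ("HttpClient.PostAsync", "client.post"),
   ("Task.Delay", "asyncio.sleep"),
   ("WebDriver.FindElementAsync", "page.query_selector"),
   ("WebDriver.ClickAsync", "element.click")]

def convert_call_to_python_py (csharp_call : String) : String :=
  convTableA.foldl
    (fun python_call kv =>
      if PySem.Str.isIn kv.1 python_call then PySem.Str.replace python_call kv.1 kv.2
      else python_call)
    csharp_call

-- ===== PORT B =====
def convTableB : List (String × String) :=
  [("HttpClient.GetAsync", "client.get"),
   ("HttpClient.PostAsync", "client.post"),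
   ("Task.Delay", "asyncio.sleep"),
   ("WebDriver.FindElementAsync", "page.query_selector"),
   ("WebDriver.ClickAsync", "element.click")]

-- call.split(pattern) for a (nonempty) separator: exact as PySem.Chars.splitOn,
-- PySem's sep ≠ "" form of str.split(sep)
def bSplit (call pattern : String) : List String :=
  (PySem.Chars.splitOn call.toList pattern.toList).map String.ofList

def bGo : String → List (String × String) → String
  | call, [] => call
  | call, (pattern, replacement) :: rest =>
      bGo (PySem.Str.join replacement (bSplit call pattern)) rest

def convert_call_to_python_py_alt (csharp_call : String) : String :=
  bGo csharp_call convTableB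

-- ===== PRECONDITION & SPEC =====
def Spec_convert_call_to_python_py (csharp_call : String) (out : String) : Prop := out = convert_call_to_python_py_alt csharp_call
instance (csharp_call : String) (out : String) : Decidable (Spec_convert_call_to_python_py csharp_call out) := by unfold Spec_convert_call_to_python_py; infer_instance

-- ===== CLAIM (what is proved, stated in full; the proofs are below) =====
def Claim_equal_convert_call_to_python_py : Prop := ∀ (csharp_call : String), Dom_convert_call_to_python_py csharp_call → Spec_convert_call_to_python_py csharp_call (convert_call_to_python_py csharp_call)

-- ===== LEMMAS AND PROOFS =====

-- accumulator-free characterisation of PySem.Chars.replace.go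
def pvRep (p r : List Char) : Nat → List Char → List Char
  | 0, l => l
  | _ + 1, [] => []
  | fuel + 1, c :: t =>
      if p.isPrefixOf (c :: t) then r ++ pvRep p r fuel ((c :: t).drop p.length)
      else c :: pvRep p r fuel t

-- prepend a onto the first piece (pvPre a never returns [])
def pvPre (a : List Char) : List (List Char) → List (List Char)
  | [] => [a]
  | x :: xs => (a ++ x) :: xs

-- accumulator-free characterisation of PySem.Chars.splitOn.go
def pvSpl (p : List Char) : Nat → List Char → List (List Char)
  | 0, l => [l]
  | _ + 1, [] => [[]]
  | fuel + 1, c :: t =>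
      if p.isPrefixOf (c :: t) then [] :: pvSpl p fuel ((c :: t).drop p.length)
      else pvPre [c] (pvSpl p fuel t)

theorem pvPre_ne_nil (a : List Char) (S : List (List Char)) : pvPre a S ≠ [] := by
  cases S <;> simp [pvPre]

theorem pvSpl_ne_nil (p : List Char) (fuel : Nat) (l : List Char) : pvSpl p fuel l ≠ [] := by
  cases fuel with
  | zero => simp [pvSpl]
  | succ n =>
    cases l with
    | nil => simp [pvSpl]
    | cons c t =>
      simp only [pvSpl]
      split
      · simp
      · exact pvPre_ne_nil _ _

theorem pvPre_pvPre (a b : List Char) (S : List (List Char)) :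
    pvPre a (pvPre b S) = pvPre (a ++ b) S := by
  cases S <;> simp [pvPre]

theorem pvPre_nil (S : List (List Char)) (hS : S ≠ []) : pvPre [] S = S := by
  cases S with
  | nil => exact absurd rfl hS
  | cons x xs => simp [pvPre]

theorem replace_go_eq (p r : List Char) :
    ∀ (fuel : Nat) (l acc : List Char),
      PySem.Chars.replace.go p r fuel l acc = acc.reverse ++ pvRep p r fuel l := by
  intro fuel
  induction fuel with
  | zero => intro l acc; simp [PySem.Chars.replace.go, pvRep]
  | succ n ih =>
    intro l acc
    cases l with
    | nil => simp [PySem.Chars.replace.go, pvRep]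
    | cons c t =>
      simp only [PySem.Chars.replace.go, pvRep]
      split
      · rw [ih]; simp
      · rw [ih]; simp

theorem splitOn_go_eq (p : List Char) :
    ∀ (fuel : Nat) (l cur : List Char) (acc : List (List Char)),
      PySem.Chars.splitOn.go p fuel l cur acc =
        acc.reverse ++ pvPre cur.reverse (pvSpl p fuel l) := by
  intro fuel
  induction fuel with
  | zero => intro l cur acc; simp [PySem.Chars.splitOn.go, pvSpl, pvPre]
  | succ n ih =>
    intro l cur acc
    cases l with
    | nil => simp [PySem.Chars.splitOn.go, pvSpl, pvPre]
    | cons c t =>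
      simp only [PySem.Chars.splitOn.go, pvSpl]
      split
      · rw [ih]
        simp only [List.reverse_nil]
        rw [pvPre_nil _ (pvSpl_ne_nil _ _ _)]
        simp [pvPre]
      · rw [ih]
        rw [pvPre_pvPre]
        simp [pvPre]

-- the result of pvRep does not depend on the fuel, once it is at least the length
theorem pvRep_fuel (p r : List Char) (hp : p ≠ []) :
    ∀ (f1 : Nat), ∀ (f2 : Nat) (l : List Char),
      l.length ≤ f1 → l.length ≤ f2 → pvRep p r f1 l = pvRep p r f2 l := by
  intro f1
  induction f1 with
  | zero =>
    intro f2 l h1 _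
    have : l = [] := List.eq_nil_of_length_eq_zero (Nat.le_zero.mp h1)
    subst this
    cases f2 <;> simp [pvRep]
  | succ n ih =>
    intro f2 l h1 h2
    cases l with
    | nil => cases f2 <;> simp [pvRep]
    | cons c t =>
      cases f2 with
      | zero => simp at h2
      | succ m =>
        have hpl : 0 < p.length := List.length_pos_iff.mpr hp
        simp only [pvRep]
        split
        · next hpre =>
          have hle : p.length ≤ (c :: t).length := (List.isPrefixOf_iff_prefix.mp hpre).length_le
          have hdrop : ((c :: t).drop p.length).length ≤ n := by
            simp only [List.length_drop]
            simp only [List.length_cons] at h1 ⊢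
            omega
          have hdrop2 : ((c :: t).drop p.length).length ≤ m := by
            simp only [List.length_drop]
            simp only [List.length_cons] at h2 ⊢
            omega
          rw [ih _ _ hdrop hdrop2]
        · have ht1 : t.length ≤ n := by simp at h1; omega
          have ht2 : t.length ≤ m := by simp at h2; omega
          rw [ih _ _ ht1 ht2]

theorem join_nil_cons (sep : List Char) (S : List (List Char)) (hS : S ≠ []) :
    PySem.Chars.join sep ([] :: S) = sep ++ PySem.Chars.join sep S := by
  obtain ⟨x, xs, rfl⟩ := List.exists_cons_of_ne_nil hS
  rw [PySem.Chars.join_cons_cons]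
  simp

theorem join_pvPre_single (sep : List Char) (c : Char) (S : List (List Char)) (hS : S ≠ []) :
    PySem.Chars.join sep (pvPre [c] S) = c :: PySem.Chars.join sep S := by
  obtain ⟨x, xs, rfl⟩ := List.exists_cons_of_ne_nil hS
  cases xs with
  | nil => simp [pvPre, PySem.Chars.join_singleton]
  | cons y ys =>
    simp only [pvPre]
    rw [PySem.Chars.join_cons_cons, PySem.Chars.join_cons_cons]
    simp

-- joining the split pieces with r is exactly the replace scan
theorem join_pvSpl (p r : List Char) :
    ∀ (fuel : Nat) (l : List Char),
      PySem.Chars.join r (pvSpl p fuel l) = pvRep p r fuel l := by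
  intro fuel
  induction fuel with
  | zero => intro l; simp [pvSpl, pvRep, PySem.Chars.join_singleton]
  | succ n ih =>
    intro l
    cases l with
    | nil => simp [pvSpl, pvRep, PySem.Chars.join_singleton]
    | cons c t =>
      simp only [pvSpl, pvRep]
      split
      · rw [join_nil_cons _ _ (pvSpl_ne_nil _ _ _), ih]
      · rw [join_pvPre_single _ _ _ (pvSpl_ne_nil _ _ _), ih]

-- if the pattern never occurs, the replace scan is the identity
theorem pvRep_id (p r : List Char) :
    ∀ (fuel : Nat) (l : List Char), ¬ (p <:+: l) → pvRep p r fuel l = l := by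
  intro fuel
  induction fuel with
  | zero => intro l _; simp [pvRep]
  | succ n ih =>
    intro l h
    cases l with
    | nil => simp [pvRep]
    | cons c t =>
      simp only [pvRep]
      split
      · next hpre =>
        exact absurd (List.isPrefixOf_iff_prefix.mp hpre).isInfix h
      · rw [ih t (fun hinf => h (hinf.trans (List.suffix_cons c t).isInfix))]

-- core identity: Chars.replace = join of splitOn pieces, for a nonempty pattern
theorem replace_eq_join_splitOn (s p r : List Char) (hp : p ≠ []) :
    PySem.Chars.replace s p r = PySem.Chars.join r (PySem.Chars.splitOn s p) := by
  unfold PySem.Chars.replace PySem.Chars.splitOn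
  rw [if_neg (by simp [hp])]
  rw [replace_go_eq, splitOn_go_eq]
  simp only [List.reverse_nil, List.nil_append]
  rw [pvPre_nil _ (pvSpl_ne_nil _ _ _), join_pvSpl]
  exact (pvRep_fuel p r hp _ _ s (Nat.le_succ _) (Nat.le_refl _)).symm

-- one pass: A's guarded replace step equals B's join-of-split step
theorem pass_eq (p r s : String) (hp : p.toList ≠ []) :
    (if PySem.Str.isIn p s then PySem.Str.replace s p r else s) =
      PySem.Str.join r (bSplit s p) := by
  have hjoin : PySem.Str.join r (bSplit s p) =
      String.ofList (PySem.Chars.replace s.toList p.toList r.toList) := by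
    unfold PySem.Str.join bSplit
    rw [replace_eq_join_splitOn _ _ _ hp]
    congr 1
    congr 1
    simp [List.map_map, Function.comp_def]
  split
  · rw [hjoin]; rfl
  · next h =>
    have hfind : PySem.Chars.find s.toList p.toList = -1 := by
      simp only [PySem.Str.isIn, PySem.Chars.isIn] at h
      simpa using h
    have hninf : ¬ (p.toList <:+: s.toList) :=
      (PySem.Chars.find_eq_neg_one_iff _ _).mp hfind
    rw [hjoin]
    unfold PySem.Chars.replace
    rw [if_neg (by simp [hp])]
    rw [replace_go_eq, pvRep_id _ _ _ _ hninf]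
    simp

theorem pass1 (s : String) :
    (if PySem.Str.isIn "HttpClient.GetAsync" s then PySem.Str.replace s "HttpClient.GetAsync" "client.get" else s) =
      PySem.Str.join "client.get" (bSplit s "HttpClient.GetAsync") := pass_eq _ _ _ (by decide)

theorem pass2 (s : String) :
    (if PySem.Str.isIn "HttpClient.PostAsync" s then PySem.Str.replace s "HttpClient.PostAsync" "client.post" else s) =
      PySem.Str.join "client.post" (bSplit s "HttpClient.PostAsync") := pass_eq _ _ _ (by decide)

theorem pass3 (s : String) :
    (if PySem.Str.isIn "Task.Delay" s then PySem.Str.replace s "Task.Delay" "asyncio.sleep" else s) =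
      PySem.Str.join "asyncio.sleep" (bSplit s "Task.Delay") := pass_eq _ _ _ (by decide)

theorem pass4 (s : String) :
    (if PySem.Str.isIn "WebDriver.FindElementAsync" s then PySem.Str.replace s "WebDriver.FindElementAsync" "page.query_selector" else s) =
      PySem.Str.join "page.query_selector" (bSplit s "WebDriver.FindElementAsync") := pass_eq _ _ _ (by decide)

theorem pass5 (s : String) :
    (if PySem.Str.isIn "WebDriver.ClickAsync" s then PySem.Str.replace s "WebDriver.ClickAsync" "element.click" else s) =
      PySem.Str.join "element.click" (bSplit s "WebDriver.ClickAsync") := pass_eq _ _ _ (by decide)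

-- ===== VERDICT (by name: the statement is the Claim_ definition above) =====
theorem convert_call_to_python_py_spec : Claim_equal_convert_call_to_python_py := by
  intro csharp_call _
  unfold Spec_convert_call_to_python_py
  unfold convert_call_to_python_py convert_call_to_python_py_alt convTableA convTableB
  simp only [List.foldl_cons, List.foldl_nil, bGo]
  rw [pass1, pass2, pass3, pass4, pass5]
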